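-- pv_equiv track=rewrite | github.com/cornernote/mtpm_lists | common.py | is_url_blacklisted
-- ===== SOURCE A (Python) =====
-- def is_url_blacklisted(url):
-- 	blacklist = [
-- 		# Wrong formats
-- 		"youtube.com",
-- 		"imgur.com",
-- 		"mediacru.sh",
-- 		"pasteboard.co",
-- 		".png",
-- 		".html",
-- 		"postimg.org",
-- 		"lut.im",
-- 		"iconarchive.com",
--
-- 		# Forum links
-- 		"forum.minetest.net/profile.php",
-- 		"minetest.net/forum/profile.php",
-- 		"github.com/minetest/minetest",
-- 		"viewtopic.php",
-- 		"viewforum.php",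
--
-- 		# Licenses
-- 		"creativecommons.org",
-- 		"gnu.org",
-- 		"sam.zoy.org",
-- 		"wtfpl.net",
--
-- 		# Help links
-- 		"wiki.minetest.com",
-- 		"wiki.minetest.net",
-- 		"dev.minetest.net",
-- 		"wikipedia.org",
-- 		"wikia.com",
-- 		"lua-users.org",
-- 		"xkcd.com",
--
-- 		# Dead sites
-- 		"ubuntuone.com",
-- 		"ompldr.org",
-- 		"04.jp.org"
-- 	]
--
-- 	exact_blacklist = [
-- 		"http://lordofthetest.se/"
-- 	]
--
-- 	if url in exact_blacklist:
-- 		return False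
--
-- 	for item in blacklist:
-- 		if item in url:
-- 			return True
--
-- 	return False
-- ===== SOURCE B (Python) =====
-- _BLACKLIST = [
--     "youtube.com", "imgur.com", "mediacru.sh", "pasteboard.co", ".png",
--     ".html", "postimg.org", "lut.im", "iconarchive.com",
--     "forum.minetest.net/profile.php", "minetest.net/forum/profile.php",
--     "github.com/minetest/minetest", "viewtopic.php", "viewforum.php",
--     "creativecommons.org", "gnu.org", "sam.zoy.org", "wtfpl.net",
--     "wiki.minetest.com", "wiki.minetest.net", "dev.minetest.net",
--     "wikipedia.org", "wikia.com", "lua-users.org", "xkcd.com",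
--     "ubuntuone.com", "ompldr.org", "04.jp.org",
-- ]
--
-- _END = "$"  # terminal marker; no blacklist entry contains "$"
--
--
-- def _build_trie(patterns):
--     root = {}
--     for p in patterns:
--         node = root
--         for c in p:
--             node = node.setdefault(c, {})
--         node[_END] = True
--     return root
--
--
-- _TRIE = _build_trie(_BLACKLIST)
--
--
-- def is_url_blacklisted(url):
--     # Multi-pattern search with a prefix tree: from each start position,
--     # walk the trie along the url; hitting a terminal node means some
--     # blacklisted substring occurs there.
--     n = len(url)
--     for i in range(n):
--         node = _TRIE
--         j = i
--         while True:
--             if _END in node: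
--                 return True
--             if j >= n:
--                 break
--             node = node.get(url[j])
--             if node is None:
--                 break
--             j += 1
--     return False
-- ===== Notes on version B (the rewrite author's own statement) =====
-- stated objective: alternative
-- what changed: Replaces the loop of 28 independent substring-membership tests (plus a redundant exact-url guard: no blacklist entry occurs in that url) with a prefix tree (trie) of the blacklist built once, walked from each start position of the url, so all patterns are matched simultaneously by one shared structure.
import Mathlib
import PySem

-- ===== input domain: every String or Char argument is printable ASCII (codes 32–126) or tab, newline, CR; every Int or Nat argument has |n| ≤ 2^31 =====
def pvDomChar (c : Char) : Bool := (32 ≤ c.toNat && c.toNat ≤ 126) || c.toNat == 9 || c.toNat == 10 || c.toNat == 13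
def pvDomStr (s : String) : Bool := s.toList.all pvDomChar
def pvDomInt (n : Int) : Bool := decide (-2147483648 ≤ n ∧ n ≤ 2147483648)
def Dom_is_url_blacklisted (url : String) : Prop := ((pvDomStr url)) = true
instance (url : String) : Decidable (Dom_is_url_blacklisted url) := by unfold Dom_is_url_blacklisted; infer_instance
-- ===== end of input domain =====

-- B replaces A's loop of per-item substring tests with a prefix tree (trie) of the
-- blacklist, built once and walked from each start position of the url (alternative
-- algorithm; the redundant exact-url guard is dropped: no entry occurs in that url).


-- ===== PORT A =====
def pvBlacklistA : List String :=
  ["youtube.com", "imgur.com", "mediacru.sh", "pasteboard.co", ".png",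
   ".html", "postimg.org", "lut.im", "iconarchive.com",
   "forum.minetest.net/profile.php", "minetest.net/forum/profile.php",
   "github.com/minetest/minetest", "viewtopic.php", "viewforum.php",
   "creativecommons.org", "gnu.org", "sam.zoy.org", "wtfpl.net",
   "wiki.minetest.com", "wiki.minetest.net", "dev.minetest.net",
   "wikipedia.org", "wikia.com", "lua-users.org", "xkcd.com",
   "ubuntuone.com", "ompldr.org", "04.jp.org"]

def pvExactBlacklistA : List String := ["http://lordofthetest.se/"]

-- the for-loop with early 'return True' is List.any over the items, in order
def is_url_blacklisted (url : String) : Bool :=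
  if pvExactBlacklistA.contains url then false
  else pvBlacklistA.any (fun item => PySem.Str.isIn item url)

-- ===== PORT B =====
-- nested dicts of Source B become a trie: terminal flag ("$" key) + ordered children list
mutual
inductive PvTrie where
  | node : Bool → PvKids → PvTrie
  deriving DecidableEq, Repr
inductive PvKids where
  | nil : PvKids
  | cons : Char → PvTrie → PvKids → PvKids
  deriving DecidableEq, Repr
end

def pvEmptyTrie : PvTrie := .node false .nil

def pvFind? : PvKids → Char → Option PvTrie
  | .nil, _ => none
  | .cons d t rest, c => if c = d then some t else pvFind? rest c

-- dict update: replace the binding in place, or append a new one (setdefault order)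
def pvUpsert : PvKids → Char → PvTrie → PvKids
  | .nil, c, v => .cons c v .nil
  | .cons d t rest, c, v => if c = d then .cons d v rest else .cons d t (pvUpsert rest c v)

-- one pattern insertion: walk/extend the child path, mark the end node terminal
def pvInsert : List Char → PvTrie → PvTrie
  | [], .node _ ch => .node true ch
  | c :: p, .node b ch =>
      .node b (pvUpsert ch c (pvInsert p ((pvFind? ch c).getD pvEmptyTrie)))

def pvBlacklistB : List String :=
  ["youtube.com", "imgur.com", "mediacru.sh", "pasteboard.co", ".png",
   ".html", "postimg.org", "lut.im", "iconarchive.com",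
   "forum.minetest.net/profile.php", "minetest.net/forum/profile.php",
   "github.com/minetest/minetest", "viewtopic.php", "viewforum.php",
   "creativecommons.org", "gnu.org", "sam.zoy.org", "wtfpl.net",
   "wiki.minetest.com", "wiki.minetest.net", "dev.minetest.net",
   "wikipedia.org", "wikia.com", "lua-users.org", "xkcd.com",
   "ubuntuone.com", "ompldr.org", "04.jp.org"]

def pvTrieB : PvTrie := pvBlacklistB.foldl (fun t p => pvInsert p.toList t) pvEmptyTrie

-- the inner while-loop of Source B: terminal check, end-of-url check, descend to the child
def pvWalk : List Char → PvTrie → Bool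
  | [], .node b _ => b
  | c :: cs, .node b ch =>
      b || (match pvFind? ch c with
            | none => false
            | some t => pvWalk cs t)

def is_url_blacklisted_alt (url : String) : Bool :=
  (List.range url.toList.length).any fun i => pvWalk (url.toList.drop i) pvTrieB

-- ===== PRECONDITION & SPEC =====
def Spec_is_url_blacklisted (url : String) (out : Bool) : Prop := out = is_url_blacklisted_alt url
instance (url : String) (out : Bool) : Decidable (Spec_is_url_blacklisted url out) := by unfold Spec_is_url_blacklisted; infer_instance

-- ===== CLAIM =====
def Claim_equal_is_url_blacklisted : Prop := ∀ (url : String), Dom_is_url_blacklisted url → Spec_is_url_blacklisted url (is_url_blacklisted url)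

-- ===== LEMMAS AND PROOFS =====

theorem pvWalk_empty (cs : List Char) : pvWalk cs pvEmptyTrie = false := by
  cases cs <;> simp [pvWalk, pvEmptyTrie, pvFind?]

theorem pvFind?_upsert_self : (ch : PvKids) → (c : Char) → (v : PvTrie) →
    pvFind? (pvUpsert ch c v) c = some v
  | .nil, c, v => by simp [pvUpsert, pvFind?]
  | .cons d t rest, c, v => by
      by_cases h : c = d <;>
        simp [pvUpsert, pvFind?, h, pvFind?_upsert_self rest c v]

theorem pvFind?_upsert_ne : (ch : PvKids) → (c d : Char) → (v : PvTrie) → d ≠ c →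
    pvFind? (pvUpsert ch c v) d = pvFind? ch d
  | .nil, c, d, v, h => by simp [pvUpsert, pvFind?, h]
  | .cons e t rest, c, d, v, h => by
      by_cases hc : c = e
      · subst hc; simp [pvUpsert, pvFind?, h]
      · by_cases hd : d = e <;>
          simp [pvUpsert, pvFind?, hc, hd, pvFind?_upsert_ne rest c d v h]

-- inserting a pattern adds exactly the walks whose url-suffix starts with it
theorem pvWalk_insert (p : List Char) (t : PvTrie) (cs : List Char) :
    pvWalk cs (pvInsert p t) = (pvWalk cs t || PySem.Chars.startswith cs p) := by
  induction p generalizing t cs with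
  | nil =>
      obtain ⟨b, ch⟩ := t
      cases cs <;> simp [pvInsert, pvWalk, PySem.Chars.startswith]
  | cons c p' ih =>
      obtain ⟨b, ch⟩ := t
      cases cs with
      | nil => simp [pvInsert, pvWalk, PySem.Chars.startswith]
      | cons d cs' =>
          by_cases h : d = c
          · subst h
            simp only [pvInsert, pvWalk, pvFind?_upsert_self, ih]
            cases hf : pvFind? ch d with
            | none =>
                simp [pvWalk_empty, PySem.Chars.startswith]
            | some t' =>
                simp [PySem.Chars.startswith, Bool.or_assoc]
          · have hsw : PySem.Chars.startswith (d :: cs') (c :: p') = false := by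
              rw [Bool.eq_false_iff, Ne, PySem.Chars.startswith_iff, List.cons_prefix_cons]
              rintro ⟨hcd, -⟩
              exact h hcd.symm
            simp only [pvInsert, pvWalk, pvFind?_upsert_ne ch c d _ h, hsw, Bool.or_false]

theorem pvWalk_foldl (l : List String) (t : PvTrie) (cs : List Char) :
    pvWalk cs (l.foldl (fun t p => pvInsert p.toList t) t)
      = (pvWalk cs t || l.any (fun p => PySem.Chars.startswith cs p.toList)) := by
  induction l generalizing t with
  | nil => simp
  | cons p rest ih => simp [List.foldl, ih, pvWalk_insert, Bool.or_assoc]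

theorem pvWalk_trieB (cs : List Char) :
    pvWalk cs pvTrieB = pvBlacklistB.any (fun p => PySem.Chars.startswith cs p.toList) := by
  rw [pvTrieB, pvWalk_foldl, pvWalk_empty, Bool.false_or]

-- the position scan over range len finds a nonempty pattern iff 'pattern in url' does
theorem pv_scan_eq_isIn (sub cs : List Char) (h : sub ≠ []) :
    ((List.range cs.length).any (fun i => PySem.Chars.startswith (cs.drop i) sub))
      = PySem.Chars.isIn sub cs := by
  rw [Bool.eq_iff_iff]
  simp only [List.any_eq_true, List.mem_range, PySem.Chars.startswith_iff,
    ← PySem.Chars.exists_prefix_drop_iff_isIn]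
  constructor
  · rintro ⟨i, _, hp⟩; exact ⟨i, hp⟩
  · rintro ⟨j, hp⟩
    refine ⟨j, ?_, hp⟩
    by_contra hj
    have : cs.drop j = [] := List.drop_eq_nil_of_le (by omega)
    rw [this] at hp
    exact h (List.prefix_nil.mp hp)

theorem pvBlacklistA_ne_nil : ∀ item ∈ pvBlacklistA, item.toList ≠ [] := by decide

theorem pv_alt_eq_any (url : String) :
    is_url_blacklisted_alt url = pvBlacklistA.any (fun item => PySem.Str.isIn item url) := by
  rw [Bool.eq_iff_iff]
  unfold is_url_blacklisted_alt
  simp only [List.any_eq_true, pvWalk_trieB, List.mem_range]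
  constructor
  · rintro ⟨i, hi, item, hmem, hsw⟩
    refine ⟨item, hmem, ?_⟩
    have hne : item.toList ≠ [] := pvBlacklistA_ne_nil item hmem
    rw [PySem.Str.isIn_eq, ← pv_scan_eq_isIn _ _ hne]
    exact List.any_eq_true.mpr ⟨i, List.mem_range.mpr hi, hsw⟩
  · rintro ⟨item, hmem, hin⟩
    have hne : item.toList ≠ [] := pvBlacklistA_ne_nil item hmem
    rw [PySem.Str.isIn_eq, ← pv_scan_eq_isIn _ _ hne] at hin
    obtain ⟨i, hi, hsw⟩ := List.any_eq_true.mp hin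
    exact ⟨i, List.mem_range.mp hi, item, hmem, hsw⟩

-- ===== VERDICT =====
theorem is_url_blacklisted_spec : Claim_equal_is_url_blacklisted := by
  intro url _
  unfold Spec_is_url_blacklisted is_url_blacklisted
  split
  · -- url is the one exact-blacklisted string: no pattern occurs in it, B computes false
    rename_i hmem
    have : url = "http://lordofthetest.se/" := by
      simpa [pvExactBlacklistA] using hmem
    subst this
    rw [pv_alt_eq_any]
    decide
  · exact (pv_alt_eq_any url).symm
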